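-- pv_equiv track=rewrite | github.com/JaeHong-Park987/Programmers | 프로그래머스/lv1/82612. 부족한 금액 계산하기/부족한 금액 계산하기.py | solution
-- ===== SOURCE A (Python) =====
-- def solution(price, money, count):
--     total = 0
--
--     while count != 0 :
--         total += price * count
--         count -= 1
--
--     lack_money = total - money
--
--     if lack_money < 0:
--         return 0
--     else:
--         return lack_money
-- ===== SOURCE B (Python) =====
-- def solution(price, money, count):
--     lack = price * count * (count + 1) // 2 - money
--     return lack if lack > 0 else 0
-- ===== Notes on version B (the rewrite author's own statement) =====
-- stated objective: faster
-- what changed: Replaces the O(count) while-loop summation with the arithmetic-series closed form price*count*(count+1)//2.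
import Mathlib
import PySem

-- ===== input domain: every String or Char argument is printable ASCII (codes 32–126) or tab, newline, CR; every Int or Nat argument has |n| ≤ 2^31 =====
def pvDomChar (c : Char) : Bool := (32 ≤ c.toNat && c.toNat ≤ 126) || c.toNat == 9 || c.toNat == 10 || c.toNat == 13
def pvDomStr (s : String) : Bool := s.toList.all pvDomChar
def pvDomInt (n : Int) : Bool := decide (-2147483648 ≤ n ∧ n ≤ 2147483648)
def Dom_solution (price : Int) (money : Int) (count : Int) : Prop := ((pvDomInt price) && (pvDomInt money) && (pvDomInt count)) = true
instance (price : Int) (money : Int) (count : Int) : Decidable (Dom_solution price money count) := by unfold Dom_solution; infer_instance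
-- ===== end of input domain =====

-- B replaces A's O(count) while-loop summation with the O(1) arithmetic-series closed form.


-- ===== PORT A =====
-- the while loop: total += price*count; count -= 1 until count == 0.
-- The 'count ≤ 0' stop is only a totality guard: Python diverges for count < 0 (excluded by Pre_).
def solutionLoop (price : Int) (count : Int) (total : Int) : Int :=
  if _h : count ≤ 0 then total
  else solutionLoop price (count - 1) (total + price * count)
termination_by count.toNat
decreasing_by omega

def solution (price : Int) (money : Int) (count : Int) : Int :=
  let total := solutionLoop price count 0
  let lack_money := total - money
  if lack_money < 0 then 0 else lack_money

-- ===== PORT B =====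
def solution_alt (price : Int) (money : Int) (count : Int) : Int :=
  let lack := PySem.Int.floordiv (price * count * (count + 1)) 2 - money
  if lack > 0 then lack else 0

-- ===== PRECONDITION & SPEC =====
-- Pre_ excludes count < 0, on which A's while loop never terminates (no value is returned).
def Pre_solution (price : Int) (money : Int) (count : Int) : Prop := 0 ≤ count
instance (price : Int) (money : Int) (count : Int) : Decidable (Pre_solution price money count) := by unfold Pre_solution; infer_instance
def pvWitness_solution : Int × Int × Int := (3, 20, 4)

def Spec_solution (price : Int) (money : Int) (count : Int) (out : Int) : Prop := out = solution_alt price money count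
instance (price : Int) (money : Int) (count : Int) (out : Int) : Decidable (Spec_solution price money count out) := by unfold Spec_solution; infer_instance

-- ===== CLAIM (what is proved, stated in full; the proofs are below) =====
def Claim_equal_solution : Prop := ∀ (price : Int) (money : Int) (count : Int), Dom_solution price money count → Pre_solution price money count → Spec_solution price money count (solution price money count)

-- ===== LEMMAS AND PROOFS =====
theorem solutionLoop_closed (price : Int) (count : Int) (total : Int) (h : 0 ≤ count) :
    solutionLoop price count total = total + price * count * (count + 1) / 2 := by
  induction count, h using Int.le_induction generalizing total with
  | base =>
      rw [solutionLoop]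
      norm_num
  | succ n hn ih =>
      rw [solutionLoop]
      have h1 : ¬ (n + 1 ≤ (0 : Int)) := by omega
      simp only [h1, dif_neg, not_false_iff]
      rw [show n + 1 - 1 = n by ring, ih]
      have he : (2 : Int) ∣ n * (n + 1) := (Int.even_mul_succ_self n).two_dvd
      have he2 : (2 : Int) ∣ (n + 1) * (n + 1 + 1) := (Int.even_mul_succ_self (n + 1)).two_dvd
      obtain ⟨k, hk⟩ := he
      obtain ⟨k2, hk2⟩ := he2
      have hdiv : n * (n + 1) / 2 = k := by rw [hk]; exact Int.mul_ediv_cancel_left k (by norm_num)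
      have hdiv2 : (n + 1) * (n + 1 + 1) / 2 = k2 := by rw [hk2]; exact Int.mul_ediv_cancel_left k2 (by norm_num)
      have : price * n * (n + 1) / 2 = price * k := by
        rw [mul_assoc, hk, ← mul_assoc, mul_comm price 2, mul_assoc]
        exact Int.mul_ediv_cancel_left _ (by norm_num)
      have h2 : price * (n + 1) * (n + 1 + 1) / 2 = price * k2 := by
        rw [mul_assoc, hk2, ← mul_assoc, mul_comm price 2, mul_assoc]
        exact Int.mul_ediv_cancel_left _ (by norm_num)
      rw [this, h2]
      have hrel : (n + 1) * (n + 1 + 1) = n * (n + 1) + 2 * (n + 1) := by ring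
      have : k2 = k + (n + 1) := by omega
      rw [this]; ring

-- ===== VERDICT (by name: the statement is the Claim_ definition above) =====
theorem solution_spec : Claim_equal_solution := by
  intro price money count _ hpre
  unfold Spec_solution solution solution_alt
  rw [solutionLoop_closed price count 0 hpre,
      PySem.Int.floordiv_eq_ediv_of_pos (a := price * count * (count + 1)) (by norm_num)]
  simp only [zero_add]
  split_ifs <;> omega
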